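-- pv_equiv track=rewrite | github.com/Zandereins/skillforge | skills/skillforge/scripts/achievements.py | _check_flawless
-- ===== SOURCE A (Python) =====
-- def _check_flawless(state: list[dict]) -> bool:
--     """Check for 5+ consecutive keeps without any discard."""
--     streak = 0
--     for e in state:
--         if e.get("status") == "keep":
--             streak += 1
--             if streak >= 5:
--                 return True
--         elif e.get("status") == "discard":
--             streak = 0
--     return False
-- ===== SOURCE B (Python) =====
-- def _split_on_discard(marks):
--     """Split a status list into discard-delimited segments, built back-to-front."""
--     segments = [[]]
--     for s in reversed(marks):
--         if s == "discard":
--             segments = [[]] + segments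
--         else:
--             segments = [[s] + segments[0]] + segments[1:]
--     return segments
--
--
-- def _check_flawless(state: list[dict]) -> bool:
--     """Staged: extract statuses, keep only keep/discard marks, split into
--     discard-delimited segments built back-to-front, then check any segment
--     holds >= 5 keeps."""
--     statuses = [e.get("status") for e in state]
--     marks = [s for s in statuses if s in ("keep", "discard")]
--     return any(len(seg) >= 5 for seg in _split_on_discard(marks))
-- ===== Notes on version B (the rewrite author's own statement) =====
-- stated objective: alternative
-- what changed: Replaced the fused early-return streak accumulator with staged passes: extract statuses, filter to keep/discard marks, split them into discard-delimited segments built back-to-front by a reversed fold, then any(len(seg) >= 5).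
import Mathlib
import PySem

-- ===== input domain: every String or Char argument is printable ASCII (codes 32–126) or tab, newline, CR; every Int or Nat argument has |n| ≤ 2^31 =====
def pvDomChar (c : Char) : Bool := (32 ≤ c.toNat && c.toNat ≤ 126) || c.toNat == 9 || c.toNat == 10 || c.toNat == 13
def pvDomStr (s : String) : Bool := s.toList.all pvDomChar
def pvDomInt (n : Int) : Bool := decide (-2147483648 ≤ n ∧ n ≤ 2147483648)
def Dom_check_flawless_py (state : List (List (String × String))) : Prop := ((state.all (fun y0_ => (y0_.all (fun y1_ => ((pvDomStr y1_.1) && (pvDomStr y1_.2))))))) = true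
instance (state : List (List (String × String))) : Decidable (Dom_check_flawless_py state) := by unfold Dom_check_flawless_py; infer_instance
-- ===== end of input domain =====

-- B replaces A's fused early-return streak accumulator with staged passes (extract statuses,
-- filter to keep/discard, recursive split on "discard", then any length >= 5); objective: alternative.

-- ===== PORT A =====
-- the for-loop of A with its early return, streak as the accumulator
def pvAgo : List (List (String × String)) → Nat → Bool
  | [], _ => false
  | e :: rest, streak =>
    if (PySem.Dict.mk e).get? "status" == some "keep" then
      if streak + 1 ≥ 5 then true else pvAgo rest (streak + 1)
    else if (PySem.Dict.mk e).get? "status" == some "discard" then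
      pvAgo rest 0
    else
      pvAgo rest streak

def check_flawless_py (state : List (List (String × String))) : Bool := pvAgo state 0

-- ===== PORT B =====
-- _split_on_discard of Source B: loop over reversed(marks) building the segments back-to-front
def pvSplitOnDiscard (marks : List (Option String)) : List (List (Option String)) :=
  marks.reverse.foldl
    (fun segments s =>
      if s == some "discard" then [] :: segments
      else (s :: segments.headD []) :: segments.tail)
    [[]]

-- _check_flawless of Source B: statuses, then marks (keep/discard only), then split, then any
def check_flawless_py_alt (state : List (List (String × String))) : Bool :=
  let statuses := state.map (fun e => (PySem.Dict.mk e).get? "status")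
  let marks := statuses.filter (fun s => s == some "keep" || s == some "discard")
  (pvSplitOnDiscard marks).any (fun seg => decide (seg.length ≥ 5))

-- ===== PRECONDITION & SPEC =====
def Spec_check_flawless_py (state : List (List (String × String))) (out : Bool) : Prop := out = check_flawless_py_alt state
instance (state : List (List (String × String))) (out : Bool) : Decidable (Spec_check_flawless_py state out) := by unfold Spec_check_flawless_py; infer_instance

-- ===== CLAIM (what is proved, stated in full; the proofs are below) =====
def Claim_equal_check_flawless_py : Prop := ∀ (state : List (List (String × String))), Dom_check_flawless_py state → Spec_check_flawless_py state (check_flawless_py state)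

-- ===== LEMMAS AND PROOFS =====

-- the reversed fold unfolds like a right fold over the marks
theorem pvSplitOnDiscard_nil : pvSplitOnDiscard [] = [[]] := rfl

theorem pvSplitOnDiscard_cons (head : Option String) (rest : List (Option String)) :
    pvSplitOnDiscard (head :: rest) =
      (if head == some "discard" then [] :: pvSplitOnDiscard rest
       else (head :: (pvSplitOnDiscard rest).headD []) :: (pvSplitOnDiscard rest).tail) := by
  simp only [pvSplitOnDiscard, List.reverse_cons, List.foldl_append, List.foldl_cons,
    List.foldl_nil]

-- the split never produces an empty list of segments
theorem pvSplitOnDiscard_ne_nil (ms : List (Option String)) : pvSplitOnDiscard ms ≠ [] := by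
  cases ms with
  | nil => simp [pvSplitOnDiscard_nil]
  | cons h t =>
    rw [pvSplitOnDiscard_cons]
    split_ifs <;> simp

-- A's fused loop with streak s equals "some segment reaches 5, crediting s to the first segment"
def pvCredit (segs : List (List (Option String))) (s : Nat) : Bool :=
  match segs with
  | [] => false
  | seg :: more => decide (s + seg.length ≥ 5) || more.any (fun t => decide (t.length ≥ 5))

theorem pvCredit_zero (segs : List (List (Option String))) :
    pvCredit segs 0 = segs.any (fun seg => decide (seg.length ≥ 5)) := by
  cases segs <;> simp [pvCredit]

theorem pvAgo_eq_credit (r : List (List (String × String))) :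
    ∀ s : Nat, s < 5 →
      pvAgo r s = pvCredit (pvSplitOnDiscard
        ((r.map (fun e => (PySem.Dict.mk e).get? "status")).filter
          (fun x => x == some "keep" || x == some "discard"))) s := by
  induction r with
  | nil => intro s hs; simp [pvAgo, pvSplitOnDiscard_nil, pvCredit]; omega
  | cons e rest ih =>
    intro s hs
    simp only [pvAgo, List.map_cons, List.filter_cons]
    by_cases hk : (PySem.Dict.mk e).get? "status" == some "keep"
    · have hd : ¬ ((PySem.Dict.mk e).get? "status" == some "discard") := by
        intro hc; rw [beq_iff_eq] at hk hc; rw [hk] at hc; simp at hc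
      simp only [hk, hd, Bool.true_or, if_true, pvSplitOnDiscard_cons]
      obtain ⟨seg, more, hsm⟩ : ∃ seg more,
          pvSplitOnDiscard ((rest.map (fun e => (PySem.Dict.mk e).get? "status")).filter
            (fun x => x == some "keep" || x == some "discard")) = seg :: more := by
        cases hx : pvSplitOnDiscard ((rest.map (fun e => (PySem.Dict.mk e).get? "status")).filter
            (fun x => x == some "keep" || x == some "discard")) with
        | nil => exact absurd hx (pvSplitOnDiscard_ne_nil _)
        | cons a b => exact ⟨a, b, rfl⟩
      rw [hsm]
      simp only [hd, List.headD_cons, List.tail_cons, pvCredit]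
      by_cases h5 : s + 1 ≥ 5
      · simp only [if_pos h5]
        simp [pvCredit]
        left; omega
      · simp only [if_neg h5]
        rw [ih (s + 1) (by omega), hsm]
        simp only [pvCredit]
        congr 1
        simp; omega
    · by_cases hd : (PySem.Dict.mk e).get? "status" == some "discard"
      · simp only [hk, hd, if_true, Bool.or_true]
        simp only [pvSplitOnDiscard_cons, hd, if_true, pvCredit]
        rw [ih 0 (by omega), pvCredit_zero]
        simp
        omega
      · simp only [hk, hd, Bool.or_self]
        exact ih s hs

-- ===== VERDICT (by name: the statement is the Claim_ definition above) =====
theorem check_flawless_py_spec : Claim_equal_check_flawless_py := by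
  intro state _
  unfold Spec_check_flawless_py check_flawless_py check_flawless_py_alt
  rw [pvAgo_eq_credit state 0 (by omega), pvCredit_zero]
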